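-- pv_equiv track=rewrite | github.com/Atong1017/trading_web_system | core/stock_list_manager.py | apply_stock_conditions
-- ===== SOURCE A (Python) =====
-- from typing import Dict, List, Any, Optional
--
-- def apply_stock_conditions(conditions: List[Dict]) -> List[Dict]:
--     """套用選股條件（模擬功能）"""
--     # 這裡可以實作真實的選股邏輯
--     # 目前返回模擬資料
--     sample_stocks = [
--         {'stock_id': '2330', 'stock_name': '台積電', 'start_date': '', 'end_date': ''},
--         {'stock_id': '2317', 'stock_name': '鴻海', 'start_date': '', 'end_date': ''},
--         {'stock_id': '2454', 'stock_name': '聯發科', 'start_date': '', 'end_date': ''},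
--         {'stock_id': '2412', 'stock_name': '中華電', 'start_date': '', 'end_date': ''},
--         {'stock_id': '1301', 'stock_name': '台塑', 'start_date': '', 'end_date': ''},
--         {'stock_id': '1303', 'stock_name': '南亞', 'start_date': '', 'end_date': ''},
--         {'stock_id': '2002', 'stock_name': '中鋼', 'start_date': '', 'end_date': ''},
--         {'stock_id': '2881', 'stock_name': '富邦金', 'start_date': '', 'end_date': ''},
--         {'stock_id': '2882', 'stock_name': '國泰金', 'start_date': '', 'end_date': ''},
--         {'stock_id': '1216', 'stock_name': '統一', 'start_date': '', 'end_date': ''}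
--     ]
--
--     # 根據條件篩選（簡化版本）
--     filtered_stocks = sample_stocks
--
--     for condition in conditions:
--         field = condition.get('field')
--         operator = condition.get('operator')
--         value = condition.get('value')
--
--         if field == 'stock_id' and operator == 'contains':
--             filtered_stocks = [s for s in filtered_stocks
--                              if value.lower() in s['stock_id'].lower()]
--         elif field == 'stock_name' and operator == 'contains':
--             filtered_stocks = [s for s in filtered_stocks
--                              if value.lower() in s['stock_name'].lower()]
--
--     return filtered_stocks
-- ===== SOURCE B (Python) =====
-- from typing import Dict, List, Any, Optional
--
-- def apply_stock_conditions(conditions: List[Dict]) -> List[Dict]: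
--     """套用選股條件（模擬功能）— single pass: stocks outer, conditions inner."""
--     sample_stocks = [
--         {'stock_id': '2330', 'stock_name': '台積電', 'start_date': '', 'end_date': ''},
--         {'stock_id': '2317', 'stock_name': '鴻海', 'start_date': '', 'end_date': ''},
--         {'stock_id': '2454', 'stock_name': '聯發科', 'start_date': '', 'end_date': ''},
--         {'stock_id': '2412', 'stock_name': '中華電', 'start_date': '', 'end_date': ''},
--         {'stock_id': '1301', 'stock_name': '台塑', 'start_date': '', 'end_date': ''},
--         {'stock_id': '1303', 'stock_name': '南亞', 'start_date': '', 'end_date': ''},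
--         {'stock_id': '2002', 'stock_name': '中鋼', 'start_date': '', 'end_date': ''},
--         {'stock_id': '2881', 'stock_name': '富邦金', 'start_date': '', 'end_date': ''},
--         {'stock_id': '2882', 'stock_name': '國泰金', 'start_date': '', 'end_date': ''},
--         {'stock_id': '1216', 'stock_name': '統一', 'start_date': '', 'end_date': ''}
--     ]
--
--     def keep(stock):
--         for condition in conditions:
--             field = condition.get('field')
--             if field in ('stock_id', 'stock_name') and condition.get('operator') == 'contains':
--                 if condition.get('value').lower() not in stock[field].lower():
--                     return False
--         return True
--
--     return [s for s in sample_stocks if keep(s)]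
-- ===== Notes on version B (the rewrite author's own statement) =====
-- stated objective: alternative
-- what changed: Inverted the loop nesting: instead of rebuilding filtered_stocks with a fresh comprehension per condition, B makes one pass over sample_stocks keeping a stock iff it satisfies every contains-condition (inner loop over conditions with early exit).
import Mathlib
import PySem

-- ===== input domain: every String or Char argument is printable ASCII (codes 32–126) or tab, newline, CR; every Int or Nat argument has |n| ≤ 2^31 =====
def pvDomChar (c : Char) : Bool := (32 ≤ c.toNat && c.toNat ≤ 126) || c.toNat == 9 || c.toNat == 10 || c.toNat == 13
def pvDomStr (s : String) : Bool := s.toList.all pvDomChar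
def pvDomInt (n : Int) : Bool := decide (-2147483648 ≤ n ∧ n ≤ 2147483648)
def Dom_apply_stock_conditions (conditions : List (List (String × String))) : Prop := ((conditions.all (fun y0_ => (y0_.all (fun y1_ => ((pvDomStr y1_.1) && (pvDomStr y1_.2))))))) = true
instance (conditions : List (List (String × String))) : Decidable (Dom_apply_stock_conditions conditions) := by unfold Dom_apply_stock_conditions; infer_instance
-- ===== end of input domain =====

-- B filters the fixed sample list in ONE pass (stocks outer, conditions inner) instead of
-- rebuilding the whole list once per condition; same return value (objective: alternative).

-- shared literal: the hardcoded sample_stocks table (used verbatim by both ports)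
def sampleStocks : List (List (String × String)) :=
  [ [("stock_id", "2330"), ("stock_name", "台積電"), ("start_date", ""), ("end_date", "")],
    [("stock_id", "2317"), ("stock_name", "鴻海"), ("start_date", ""), ("end_date", "")],
    [("stock_id", "2454"), ("stock_name", "聯發科"), ("start_date", ""), ("end_date", "")],
    [("stock_id", "2412"), ("stock_name", "中華電"), ("start_date", ""), ("end_date", "")],
    [("stock_id", "1301"), ("stock_name", "台塑"), ("start_date", ""), ("end_date", "")],
    [("stock_id", "1303"), ("stock_name", "南亞"), ("start_date", ""), ("end_date", "")],
    [("stock_id", "2002"), ("stock_name", "中鋼"), ("start_date", ""), ("end_date", "")],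
    [("stock_id", "2881"), ("stock_name", "富邦金"), ("start_date", ""), ("end_date", "")],
    [("stock_id", "2882"), ("stock_name", "國泰金"), ("start_date", ""), ("end_date", "")],
    [("stock_id", "1216"), ("stock_name", "統一"), ("start_date", ""), ("end_date", "")] ]

-- ===== PORT A =====
-- A's per-condition list rebuild: fold over conditions, each matching condition
-- replaces filtered_stocks by a fresh comprehension over it.
-- (Python raises AttributeError when a matching condition lacks 'value' and the list is
--  nonempty; such inputs are outside Pre_ below — the port uses getD "" there, unchecked.)
def apply_stock_conditions (conditions : List (List (String × String))) : List (List (String × String)) :=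
  conditions.foldl (fun filtered condition =>
    let field := (PySem.Dict.mk condition).get? "field"
    let operator := (PySem.Dict.mk condition).get? "operator"
    let value := (PySem.Dict.mk condition).get? "value"
    if field = some "stock_id" ∧ operator = some "contains" then
      filtered.filter (fun s =>
        PySem.Str.isIn (PySem.Str.lower (value.getD ""))
          (PySem.Str.lower (((PySem.Dict.mk s).get? "stock_id").getD "")))
    else if field = some "stock_name" ∧ operator = some "contains" then
      filtered.filter (fun s =>
        PySem.Str.isIn (PySem.Str.lower (value.getD ""))
          (PySem.Str.lower (((PySem.Dict.mk s).get? "stock_name").getD "")))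
    else filtered) sampleStocks

-- ===== PORT B =====
-- B's inner loop over conditions with early return False (the 'keep' helper in Source B)
def keepStock (stock : List (String × String)) : List (List (String × String)) → Bool
  | [] => true
  | condition :: rest =>
    let field := (PySem.Dict.mk condition).get? "field"
    if (field = some "stock_id" ∨ field = some "stock_name") ∧
        (PySem.Dict.mk condition).get? "operator" = some "contains" then
      if PySem.Str.isIn (PySem.Str.lower (((PySem.Dict.mk condition).get? "value").getD ""))
          (PySem.Str.lower (((PySem.Dict.mk stock).get? (field.getD "")).getD "")) then
        keepStock stock rest
      else false
    else keepStock stock rest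

def apply_stock_conditions_alt (conditions : List (List (String × String))) : List (List (String × String)) :=
  sampleStocks.filter (fun s => keepStock s conditions)

-- ===== PRECONDITION & SPEC =====
-- Pre_ excludes conditions in which a matching contains-condition has no 'value' entry:
-- there Python A raises AttributeError (None.lower()), except in the accidental case where
-- earlier conditions already emptied the list, in which case both programs return [].
def Pre_apply_stock_conditions (conditions : List (List (String × String))) : Prop :=
  ∀ c ∈ conditions,
    (((PySem.Dict.mk c).get? "field" = some "stock_id" ∨ (PySem.Dict.mk c).get? "field" = some "stock_name") ∧
      (PySem.Dict.mk c).get? "operator" = some "contains") →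
    ((PySem.Dict.mk c).get? "value").isSome = true
instance (conditions : List (List (String × String))) : Decidable (Pre_apply_stock_conditions conditions) := by
  unfold Pre_apply_stock_conditions; infer_instance

def pvWitness_apply_stock_conditions : (List (List (String × String))) :=
  [[("field", "stock_id"), ("operator", "contains"), ("value", "23")]]

def Spec_apply_stock_conditions (conditions : List (List (String × String))) (out : List (List (String × String))) : Prop := out = apply_stock_conditions_alt conditions
instance (conditions : List (List (String × String))) (out : List (List (String × String))) : Decidable (Spec_apply_stock_conditions conditions out) := by unfold Spec_apply_stock_conditions; infer_instance

-- ===== CLAIM (what is proved, stated in full; the proofs are below) =====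
def Claim_equal_apply_stock_conditions : Prop := ∀ (conditions : List (List (String × String))), Dom_apply_stock_conditions conditions → Pre_apply_stock_conditions conditions → Spec_apply_stock_conditions conditions (apply_stock_conditions conditions)

-- ===== LEMMAS AND PROOFS =====

-- core invariant: A's fold of per-condition filters equals one filter by keepStock,
-- starting from ANY list of stocks (induction on the conditions list).
theorem foldl_filter_eq_filter_keep (conds : List (List (String × String)))
    (stocks : List (List (String × String))) :
    conds.foldl (fun filtered condition =>
      let field := (PySem.Dict.mk condition).get? "field"
      let operator := (PySem.Dict.mk condition).get? "operator"
      let value := (PySem.Dict.mk condition).get? "value"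
      if field = some "stock_id" ∧ operator = some "contains" then
        filtered.filter (fun s =>
          PySem.Str.isIn (PySem.Str.lower (value.getD ""))
            (PySem.Str.lower (((PySem.Dict.mk s).get? "stock_id").getD "")))
      else if field = some "stock_name" ∧ operator = some "contains" then
        filtered.filter (fun s =>
          PySem.Str.isIn (PySem.Str.lower (value.getD ""))
            (PySem.Str.lower (((PySem.Dict.mk s).get? "stock_name").getD "")))
      else filtered) stocks
    = stocks.filter (fun s => keepStock s conds) := by
  induction conds generalizing stocks with
  | nil => simp [keepStock]
  | cons c rest ih =>
    simp only [List.foldl_cons]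
    rw [ih]
    by_cases h1 : (PySem.Dict.mk c).get? "field" = some "stock_id" ∧ (PySem.Dict.mk c).get? "operator" = some "contains"
    · simp only [if_pos h1, List.filter_filter]
      apply List.filter_congr
      intro s _
      simp [keepStock, h1.1, h1.2, Bool.and_comm]
    · by_cases h2 : (PySem.Dict.mk c).get? "field" = some "stock_name" ∧ (PySem.Dict.mk c).get? "operator" = some "contains"
      · simp only [if_neg h1, if_pos h2, List.filter_filter]
        apply List.filter_congr
        intro s _
        simp [keepStock, h2.1, h2.2, Bool.and_comm]
      · simp only [if_neg h1, if_neg h2]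
        apply List.filter_congr
        intro s _
        have : ¬ (((PySem.Dict.mk c).get? "field" = some "stock_id" ∨ (PySem.Dict.mk c).get? "field" = some "stock_name") ∧
            (PySem.Dict.mk c).get? "operator" = some "contains") := by tauto
        simp [keepStock, this]

-- ===== VERDICT (by name: the statement is the Claim_ definition above) =====
theorem apply_stock_conditions_spec : Claim_equal_apply_stock_conditions := by
  intro conditions _ _
  unfold Spec_apply_stock_conditions apply_stock_conditions apply_stock_conditions_alt
  exact foldl_filter_eq_filter_keep conditions sampleStocks
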